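-- pv_equiv track=rewrite | github.com/ITanmayee/Codeforce | sum_of_2050.py | can
-- ===== SOURCE A (Python) =====
-- def can(num):
--     if num < 2050:
--         return - 1
--
--     if num % 2050 != 0:
--         return -1
--     if len(str(num)) == 4:
--         return num // 2050
--     return sum([int(i) for i in str(num // 2050)])
-- ===== SOURCE B (Python) =====
-- def can(num):
--     if num < 2050:
--         return -1
--     if num % 2050 != 0:
--         return -1
--     q = num // 2050
--     total = 0
--     while q > 0:
--         total += q % 10
--         q //= 10
--     return total
-- ===== Notes on version B (the rewrite author's own statement) =====
-- stated objective: idiomatic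
-- what changed: Digit sum of num//2050 is computed arithmetically with a while loop (q%10, q//=10) instead of converting to a string and summing int(ch) per character, and the redundant 4-digit special case is dropped (a quotient below 10 is its own digit sum).
import Mathlib
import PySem

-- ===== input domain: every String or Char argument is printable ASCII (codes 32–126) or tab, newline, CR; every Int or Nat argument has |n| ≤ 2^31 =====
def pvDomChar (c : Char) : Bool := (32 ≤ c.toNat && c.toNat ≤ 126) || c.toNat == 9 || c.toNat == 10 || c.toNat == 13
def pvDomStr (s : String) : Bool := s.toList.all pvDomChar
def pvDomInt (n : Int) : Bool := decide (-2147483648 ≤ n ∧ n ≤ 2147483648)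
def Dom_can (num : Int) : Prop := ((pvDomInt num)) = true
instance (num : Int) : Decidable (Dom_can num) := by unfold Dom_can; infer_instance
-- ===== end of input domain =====

-- B computes the digit sum of num//2050 arithmetically (q%10 / q//=10 loop) instead of
-- converting to a string, and drops the redundant 4-digit special case (objective: idiomatic).

-- ===== PORT A =====
-- int(i) for a single character i of str(num // 2050); all those characters are decimal
-- digits here (the quotient is ≥ 1), so the .getD 0 default is never used — exact.
def canDigitVal (c : Char) : Int := (PySem.Int.ofStr? (String.mk [c])).getD 0

def can (num : Int) : Int :=
  if num < 2050 then -1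
  else if PySem.Int.mod num 2050 ≠ 0 then -1
  else if PySem.Str.len (PySem.Int.toStr num) = 4 then PySem.Int.floordiv num 2050
  else ((PySem.Int.toStr (PySem.Int.floordiv num 2050)).toList.map canDigitVal).sum

-- ===== PORT B =====
-- the while loop 'while q > 0: total += q % 10; q //= 10'
def canLoop (q total : Int) : Int :=
  if h : 0 < q then canLoop (PySem.Int.floordiv q 10) (total + PySem.Int.mod q 10)
  else total
termination_by q.toNat
decreasing_by
  have := PySem.Int.floordiv_eq_ediv_of_pos (a := q) (b := 10) (by omega)
  rw [this]; omega

def can_alt (num : Int) : Int :=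
  if num < 2050 then -1
  else if PySem.Int.mod num 2050 ≠ 0 then -1
  else canLoop (PySem.Int.floordiv num 2050) 0

-- ===== PRECONDITION & SPEC =====
def Spec_can (num : Int) (out : Int) : Prop := out = can_alt num
instance (num : Int) (out : Int) : Decidable (Spec_can num out) := by unfold Spec_can; infer_instance

-- ===== CLAIM (what is proved, stated in full; the proofs are below) =====
def Claim_equal_can : Prop := ∀ (num : Int), Dom_can num → Spec_can num (can num)

-- ===== LEMMAS AND PROOFS =====

-- arithmetic digit sum on Nat, the common reference of both ports
def natDigitSum : Nat → Nat := fun n =>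
  if h : n = 0 then 0 else n % 10 + natDigitSum (n / 10)
decreasing_by omega

theorem natDigitSum_zero : natDigitSum 0 = 0 := by unfold natDigitSum; simp

theorem natDigitSum_pos (n : Nat) (h : n ≠ 0) :
    natDigitSum n = n % 10 + natDigitSum (n / 10) := by
  conv_lhs => rw [natDigitSum]
  simp [h]

theorem natDigitSum_small (n : Nat) (h : n < 10) : natDigitSum n = n := by
  rcases Nat.eq_zero_or_pos n with h0 | h0
  · simp [h0, natDigitSum_zero]
  · rw [natDigitSum_pos n (by omega)]
    rw [Nat.div_eq_of_lt h, natDigitSum_zero, Nat.mod_eq_of_lt h]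
    omega

theorem canDigitVal_digitChar (m : Nat) (hm : m < 10) :
    canDigitVal (Nat.digitChar m) = (m : Int) := by
  interval_cases m <;> decide

theorem charSum_toDigitsCore (fuel : Nat) :
    ∀ (n : Nat) (ds : List Char), n < 10 ^ fuel →
      ((Nat.toDigitsCore 10 fuel n ds).map canDigitVal).sum
        = (natDigitSum n : Int) + (ds.map canDigitVal).sum := by
  induction fuel with
  | zero =>
    intro n ds hn
    have hn0 : n = 0 := by simpa using hn
    subst hn0
    simp [Nat.toDigitsCore, natDigitSum_zero]
  | succ f ih =>
    intro n ds hn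
    rw [Nat.toDigitsCore]
    by_cases h10 : n / 10 = 0
    · rw [if_pos h10]
      have hnlt : n < 10 := by omega
      rw [List.map_cons, List.sum_cons,
        canDigitVal_digitChar _ (Nat.mod_lt n (by omega)),
        natDigitSum_small n hnlt, Nat.mod_eq_of_lt hnlt]
    · rw [if_neg h10]
      rw [ih (n / 10) _ (by rw [pow_succ] at hn; omega)]
      rw [List.map_cons, List.sum_cons,
        canDigitVal_digitChar _ (Nat.mod_lt n (by omega)),
        natDigitSum_pos n (by omega)]
      push_cast
      ring

-- lower bound on the printed length: 10^k ≤ n forces at least k+1 characters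
theorem toDigitsCore_len_lb (fuel : Nat) :
    ∀ (n : Nat) (ds : List Char) (k : Nat), n < 10 ^ fuel → 10 ^ k ≤ n →
      k + 1 + ds.length ≤ (Nat.toDigitsCore 10 fuel n ds).length := by
  induction fuel with
  | zero =>
    intro n ds k hn hk
    have : 0 < 10 ^ k := Nat.pow_pos (by omega)
    omega
  | succ f ih =>
    intro n ds k hn hk
    rw [Nat.toDigitsCore]
    by_cases h10 : n / 10 = 0
    · rw [if_pos h10]
      simp only [List.length_cons]
      have hn10 : n < 10 := by omega
      have hk0 : k = 0 := by
        by_contra hne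
        have : 10 ≤ 10 ^ k := by
          calc 10 = 10 ^ 1 := by norm_num
          _ ≤ 10 ^ k := Nat.pow_le_pow_right (by omega) (by omega)
        omega
      omega
    · rw [if_neg h10]
      rcases k with _ | k'
      · have := ih (n / 10) (Nat.digitChar (n % 10) :: ds) 0
          (by rw [pow_succ] at hn; omega) (by omega)
        simp only [List.length_cons] at this
        omega
      · have hdiv : 10 ^ k' ≤ n / 10 := by
          rw [Nat.le_div_iff_mul_le (by omega)]
          calc 10 ^ k' * 10 = 10 ^ (k' + 1) := by rw [pow_succ]
          _ ≤ n := hk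
        have := ih (n / 10) (Nat.digitChar (n % 10) :: ds) k'
          (by rw [pow_succ] at hn; omega) hdiv
        simp only [List.length_cons] at this
        omega

theorem lt_pow_self_ten (n : Nat) : n < 10 ^ n :=
  Nat.lt_pow_self (by omega)

-- if str(n) has 4 characters then n < 10000 (for n ≥ 0)
theorem toStr_len_four (n : Int) (hn : 0 ≤ n)
    (h : PySem.Str.len (PySem.Int.toStr n) = 4) : n < 10000 := by
  by_contra hge
  have hge' : 10000 ≤ n := by omega
  have hne : ¬ n < 0 := by omega
  have hchars : (PySem.Int.toStr n).toList = Nat.toDigits 10 n.toNat := by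
    rw [PySem.Int.toList_toStr, PySem.Int.toChars, if_neg hne]
  have hlen : (PySem.Int.toStr n).toList.length = 4 := by
    have := PySem.Str.len_eq (PySem.Int.toStr n)
    omega
  have hlb := toDigitsCore_len_lb (n.toNat + 1) n.toNat [] 4
    (lt_of_lt_of_le (lt_pow_self_ten n.toNat) (Nat.pow_le_pow_right (by omega) (by omega)))
    (by omega)
  rw [← Nat.toDigits] at hlb
  rw [hchars] at hlen
  omega

theorem canLoop_eq (n : Nat) : ∀ (t : Int), canLoop (n : Int) t = t + (natDigitSum n : Int) := by
  induction n using Nat.strong_induction_on with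
  | _ n ih =>
    intro t
    rw [canLoop]
    by_cases h : (0 : Int) < (n : Int)
    · rw [dif_pos h]
      have hn0 : n ≠ 0 := by omega
      have hdiv : PySem.Int.floordiv (n : Int) 10 = ((n / 10 : Nat) : Int) :=
        PySem.Int.floordiv_natCast n 10
      have hmod : PySem.Int.mod (n : Int) 10 = ((n % 10 : Nat) : Int) :=
        PySem.Int.mod_natCast n 10
      rw [hdiv, hmod, ih (n / 10) (by omega)]
      rw [natDigitSum_pos n hn0]
      push_cast
      ring
    · rw [dif_neg h]
      have hn0 : n = 0 := by omega
      simp [hn0, natDigitSum_zero]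

theorem canLoop_small (q : Int) (h0 : 0 ≤ q) (h : q < 10) : canLoop q 0 = q := by
  have hq : q = ((q.toNat : Nat) : Int) := by omega
  rw [hq, canLoop_eq q.toNat 0, natDigitSum_small q.toNat (by omega)]
  omega

-- A's string digit sum equals B's arithmetic loop, for nonnegative q
theorem charSum_eq_canLoop (q : Int) (hq : 0 ≤ q) :
    ((PySem.Int.toStr q).toList.map canDigitVal).sum = canLoop q 0 := by
  lift q to Nat using hq with n
  have hne : ¬ (n : Int) < 0 := by omega
  rw [PySem.Int.toList_toStr, PySem.Int.toChars, if_neg hne, Nat.toDigits]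
  simp only [Int.toNat_natCast]
  rw [charSum_toDigitsCore (n + 1) n []
    (lt_of_lt_of_le (lt_pow_self_ten n) (Nat.pow_le_pow_right (by omega) (by omega)))]
  rw [canLoop_eq n 0]
  simp

-- ===== VERDICT (by name: the statement is the Claim_ definition above) =====
theorem can_spec : Claim_equal_can := by
  unfold Claim_equal_can
  intro num _
  unfold Spec_can can can_alt
  by_cases h1 : num < 2050
  · rw [if_pos h1, if_pos h1]
  · rw [if_neg h1, if_neg h1]
    by_cases h2 : PySem.Int.mod num 2050 ≠ 0
    · rw [if_pos h2, if_pos h2]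
    · rw [if_neg h2, if_neg h2]
      have h1' : 2050 ≤ num := by omega
      set q := PySem.Int.floordiv num 2050 with hqdef
      have hq1 : 1 ≤ q := by
        rw [hqdef, PySem.Int.le_floordiv_iff_mul_le (by omega)]
        omega
      by_cases h4 : PySem.Str.len (PySem.Int.toStr num) = 4
      · rw [if_pos h4]
        have hnum : num < 10000 := toStr_len_four num (by omega) h4
        have hq5 : q < 5 := by
          rw [hqdef, PySem.Int.floordiv_lt_iff_lt_mul (by omega)]
          omega
        exact (canLoop_small q (by omega) (by omega)).symm
      · rw [if_neg h4]
        exact charSum_eq_canLoop q (by omega)
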